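-- pv_equiv track=rewrite | github.com/shaabby/TextDedup | src/textdedup/chunking.py | _pack_spans_by_chars
-- ===== SOURCE A (Python) =====
-- from typing import Literal, Sequence
--
-- def _pack_spans_by_chars(text: str, spans: Sequence[tuple[int, int]], max_chars: int) -> list[tuple[int, int]]:
--     if not spans:
--         return []
--
--     packed: list[tuple[int, int]] = []
--     current_start, current_end = spans[0]
--     for start, end in spans[1:]:
--         if end - current_start <= max_chars:
--             current_end = end
--             continue
--         packed.append((current_start, current_end))
--         current_start, current_end = start, end
--     packed.append((current_start, current_end))
--     return packed
-- ===== SOURCE B (Python) =====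
-- def _pack_spans_by_chars(text, spans, max_chars):
--     def go(xs):
--         if not xs:
--             return []
--         s, e = xs[0]
--         k = 1
--         while k < len(xs) and xs[k][1] - s <= max_chars:
--             k += 1
--         grp, rest = xs[:k], xs[k:]
--         return [(s, grp[-1][1])] + go(rest)
--     return go(list(spans))
-- ===== Notes on version B (the rewrite author's own statement) =====
-- stated objective: alternative
-- what changed: Replaces the single fold carrying (packed, current_start, current_end) accumulators by a recursive group-splitting: each step peels the longest prefix forming one group and emits its span, recursing on the remainder.
import Mathlib
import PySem

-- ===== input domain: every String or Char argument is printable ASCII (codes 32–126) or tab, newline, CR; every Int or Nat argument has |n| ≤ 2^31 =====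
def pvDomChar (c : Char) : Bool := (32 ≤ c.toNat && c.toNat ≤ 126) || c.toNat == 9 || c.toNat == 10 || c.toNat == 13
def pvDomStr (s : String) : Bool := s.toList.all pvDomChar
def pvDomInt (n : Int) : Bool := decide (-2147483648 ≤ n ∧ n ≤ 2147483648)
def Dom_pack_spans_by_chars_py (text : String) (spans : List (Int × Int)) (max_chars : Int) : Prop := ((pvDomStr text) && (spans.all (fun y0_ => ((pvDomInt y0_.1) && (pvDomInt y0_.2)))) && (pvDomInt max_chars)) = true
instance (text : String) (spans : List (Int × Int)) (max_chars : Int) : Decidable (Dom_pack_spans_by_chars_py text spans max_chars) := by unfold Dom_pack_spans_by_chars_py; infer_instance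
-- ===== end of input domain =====

-- B replaces A's single fold with running accumulators by a recursive group-splitting
-- decomposition (peel the longest fitting prefix per group); same cost, alternative structure.


-- ===== PORT A =====
def pack_spans_by_chars_py (text : String) (spans : List (Int × Int)) (max_chars : Int) : List (Int × Int) :=
  match spans with
  | [] => []
  | (s0, e0) :: rest =>
    let st := rest.foldl
      (fun (acc : List (Int × Int) × Int × Int) (p : Int × Int) =>
        if p.2 - acc.2.1 ≤ max_chars then (acc.1, acc.2.1, p.2)
        else (acc.1 ++ [(acc.2.1, acc.2.2)], p.1, p.2))
      ([], s0, e0)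
    st.1 ++ [(st.2.1, st.2.2)]

-- ===== PORT B =====
def packGo (max_chars : Int) : List (Int × Int) → List (Int × Int)
  | [] => []
  | (s, e) :: rest =>
    let grp := rest.takeWhile (fun p => p.2 - s ≤ max_chars)
    let rest' := rest.dropWhile (fun p => p.2 - s ≤ max_chars)
    (s, (grp.getLastD (s, e)).2) :: packGo max_chars rest'
termination_by xs => xs.length
decreasing_by
  exact Nat.lt_succ_of_le (List.length_dropWhile_le _ _)

def pack_spans_by_chars_py_alt (text : String) (spans : List (Int × Int)) (max_chars : Int) : List (Int × Int) :=
  packGo max_chars spans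

-- ===== PRECONDITION & SPEC =====
def Spec_pack_spans_by_chars_py (text : String) (spans : List (Int × Int)) (max_chars : Int) (out : List (Int × Int)) : Prop := out = pack_spans_by_chars_py_alt text spans max_chars
instance (text : String) (spans : List (Int × Int)) (max_chars : Int) (out : List (Int × Int)) : Decidable (Spec_pack_spans_by_chars_py text spans max_chars out) := by unfold Spec_pack_spans_by_chars_py; infer_instance

-- ===== CLAIM (what is proved, stated in full; the proofs are below) =====
def Claim_equal_pack_spans_by_chars_py : Prop := ∀ (text : String) (spans : List (Int × Int)) (max_chars : Int), Dom_pack_spans_by_chars_py text spans max_chars → Spec_pack_spans_by_chars_py text spans max_chars (pack_spans_by_chars_py text spans max_chars)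

-- ===== LEMMAS AND PROOFS =====

/-- Recursive characterisation of A's fold (proof helper only). -/
def auxA (mc cs ce : Int) : List (Int × Int) → List (Int × Int)
  | [] => [(cs, ce)]
  | (s, e) :: t => if e - cs ≤ mc then auxA mc cs e t else (cs, ce) :: auxA mc s e t

lemma foldl_eq_auxA (mc : Int) (rest : List (Int × Int)) :
    ∀ (packed : List (Int × Int)) (cs ce : Int),
      (let st := rest.foldl
        (fun (acc : List (Int × Int) × Int × Int) (p : Int × Int) =>
          if p.2 - acc.2.1 ≤ mc then (acc.1, acc.2.1, p.2)
          else (acc.1 ++ [(acc.2.1, acc.2.2)], p.1, p.2))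
        (packed, cs, ce)
       st.1 ++ [(st.2.1, st.2.2)]) = packed ++ auxA mc cs ce rest := by
  induction rest with
  | nil => intro packed cs ce; simp [auxA]
  | cons p t ih =>
    intro packed cs ce
    simp only [List.foldl_cons, auxA]
    by_cases h : p.2 - cs ≤ mc
    · simp only [h]
      simpa using ih packed cs p.2
    · simp only [h]
      simpa using ih (packed ++ [(cs, ce)]) p.1 p.2

lemma getLastD_snd_congr (l : List (Int × Int)) :
    ∀ d d' : Int × Int, d.2 = d'.2 → (l.getLastD d).2 = (l.getLastD d').2 := by
  induction l with
  | nil => intro d d' h; simpa using h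
  | cons a t ih => intro d d' h; rw [List.getLastD_cons, List.getLastD_cons]

lemma auxA_eq_packGo (mc : Int) : ∀ (rest : List (Int × Int)) (cs ce : Int),
    auxA mc cs ce rest =
      (cs, ((rest.takeWhile (fun p => p.2 - cs ≤ mc)).getLastD (cs, ce)).2)
        :: packGo mc (rest.dropWhile (fun p => p.2 - cs ≤ mc)) := by
  intro rest
  induction rest with
  | nil => intro cs ce; simp [auxA, packGo]
  | cons p t ih =>
    intro cs ce
    by_cases h : p.2 - cs ≤ mc
    · simp only [auxA, List.takeWhile_cons, List.dropWhile_cons, h, decide_true,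
        if_true, List.getLastD_cons]
      rw [ih cs p.2]
      congr 1
      · exact congrArg _ (getLastD_snd_congr _ (cs, p.2) p rfl)
    · simp only [auxA, if_neg h, List.takeWhile_cons, List.dropWhile_cons, h, decide_false,
        if_false, List.getLastD_nil]
      rw [packGo.eq_def]
      rw [ih p.1 p.2]
      rfl

-- ===== VERDICT (by name: the statement is the Claim_ definition above) =====
theorem pack_spans_by_chars_py_spec : Claim_equal_pack_spans_by_chars_py := by
  intro text spans mc _
  unfold Spec_pack_spans_by_chars_py pack_spans_by_chars_py_alt
  cases spans with
  | nil => simp [pack_spans_by_chars_py, packGo]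
  | cons p rest =>
    obtain ⟨s0, e0⟩ := p
    show _ = packGo mc ((s0, e0) :: rest)
    rw [pack_spans_by_chars_py]
    rw [foldl_eq_auxA mc rest [] s0 e0, auxA_eq_packGo mc rest s0 e0]
    conv_rhs => rw [packGo.eq_def]
    simp
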